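-- pv_equiv track=rewrite | github.com/adrianvigan/kb-assist | dashboard/api_server.py | parse_perts_for_kb_update
-- ===== SOURCE A (Python) =====
-- def parse_perts_for_kb_update(perts_text):
--     """
--     Parse PERTS to extract:
--     - issue_description: What's wrong (PROBLEM_DESCRIPTION + ERROR_MESSAGE + ROOT_CAUSE)
--     - proposed_steps: What to add (SOLUTION_THAT_WORKED)
--     """
--     if not perts_text:
--         return perts_text, perts_text
--
--     issue_parts = []
--     proposed_solution = []
--
--     lines = perts_text.split('\n')
--     current_section = None
--     section_content = []
--
--     for line in lines:
--         line_upper = line.strip().upper()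
--
--         if 'PROBLEM_DESCRIPTION' in line_upper or 'PROBLEM DESCRIPTION' in line_upper:
--             if section_content and current_section:
--                 if current_section == 'solution':
--                     proposed_solution.extend(section_content)
--                 elif current_section in ['problem', 'error', 'root_cause']:
--                     issue_parts.extend(section_content)
--             current_section = 'problem'
--             section_content = []
--         elif 'ERROR_MESSAGE' in line_upper or 'ERROR MESSAGE' in line_upper:
--             if section_content and current_section in ['problem', 'error', 'root_cause']:
--                 issue_parts.extend(section_content)
--             current_section = 'error'
--             section_content = []
--         elif 'ROOT_CAUSE' in line_upper or 'ROOT CAUSE' in line_upper: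
--             if section_content and current_section in ['problem', 'error', 'root_cause']:
--                 issue_parts.extend(section_content)
--             current_section = 'root_cause'
--             section_content = []
--         elif 'SOLUTION_THAT_WORKED' in line_upper or 'SOLUTION THAT WORKED' in line_upper:
--             if section_content and current_section in ['problem', 'error', 'root_cause']:
--                 issue_parts.extend(section_content)
--             current_section = 'solution'
--             section_content = []
--         elif 'TROUBLESHOOTING' in line_upper:
--             if section_content and current_section in ['problem', 'error', 'root_cause']:
--                 issue_parts.extend(section_content)
--             current_section = 'troubleshooting'
--             section_content = []
--         elif line.strip() and line.strip().lower() not in ['n/a', 'na', 'none']: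
--             section_content.append(line.strip())
--
--     # Capture last section
--     if section_content:
--         if current_section == 'solution':
--             proposed_solution.extend(section_content)
--         elif current_section in ['problem', 'error', 'root_cause']:
--             issue_parts.extend(section_content)
--
--     issue_description = '\n'.join(issue_parts).strip() if issue_parts else "Issue not specified"
--     proposed_steps = '\n'.join(proposed_solution).strip() if proposed_solution else perts_text
--
--     return issue_description, proposed_steps
-- ===== SOURCE B (Python) =====
-- HEADER_SECTIONS = [
--     (('PROBLEM_DESCRIPTION', 'PROBLEM DESCRIPTION'), 'problem'),
--     (('ERROR_MESSAGE', 'ERROR MESSAGE'), 'error'),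
--     (('ROOT_CAUSE', 'ROOT CAUSE'), 'root_cause'),
--     (('SOLUTION_THAT_WORKED', 'SOLUTION THAT WORKED'), 'solution'),
--     (('TROUBLESHOOTING',), 'troubleshooting'),
-- ]
--
--
-- def _classify(line_upper):
--     """Return the section a header line opens, or None for a content line."""
--     for keywords, name in HEADER_SECTIONS:
--         if any(k in line_upper for k in keywords):
--             return name
--     return None
--
--
-- def parse_perts_for_kb_update(perts_text):
--     """
--     Two-pass variant: split the text into (section, content) segments,
--     then route each segment's content by its section alone.
--     """
--     if not perts_text:
--         return perts_text, perts_text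
--
--     # Pass 1: segment the text.
--     segments = []
--     cur_sec, cur_lines = None, []
--     for line in perts_text.split('\n'):
--         stripped = line.strip()
--         sec = _classify(stripped.upper())
--         if sec is not None:
--             segments.append((cur_sec, cur_lines))
--             cur_sec, cur_lines = sec, []
--         elif stripped and stripped.lower() not in ['n/a', 'na', 'none']:
--             cur_lines.append(stripped)
--     segments.append((cur_sec, cur_lines))
--
--     # Pass 2: route segment content.
--     issue_parts = []
--     proposed_solution = []
--     for sec, content in segments:
--         if sec in ('problem', 'error', 'root_cause'):
--             issue_parts += content
--         elif sec == 'solution':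
--             proposed_solution += content
--
--     issue_description = '\n'.join(issue_parts).strip() if issue_parts else "Issue not specified"
--     proposed_steps = '\n'.join(proposed_solution).strip() if proposed_solution else perts_text
--     return issue_description, proposed_steps
-- ===== Notes on version B (the rewrite author's own statement) =====
-- stated objective: alternative
-- what changed: Replaces A's single stateful line loop with a two-pass decomposition (segment the text, then route each segment's content by its section alone); B keeps every SOLUTION_THAT_WORKED section's content, where A silently drops solution content unless the section is last or followed by a PROBLEM header.
-- intended difference: On texts where a SOLUTION_THAT_WORKED section with content is followed by a non-PROBLEM section header, A silently drops that solution content (its loop only flushes the solution buffer at a PROBLEM header or at end of text), often falling back to returning the whole text as proposed_steps; B keeps all solution content, which is the intended proposed_steps value for the knowledge-base update. — e.g. on parse_perts_for_kb_update(some "SOLUTION_THAT_WORKED\nfix\nTROUBLESHOOTING"): A returns ("Issue not specified", "SOLUTION_THAT_WORKED\nfix\nTROUBLESHOOTING"), B returns ("Issue not specified", "fix")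
-- outside the precondition, e.g. on parse_perts_for_kb_update(None): A returns (None, None), B returns (None, None)
import Mathlib
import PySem

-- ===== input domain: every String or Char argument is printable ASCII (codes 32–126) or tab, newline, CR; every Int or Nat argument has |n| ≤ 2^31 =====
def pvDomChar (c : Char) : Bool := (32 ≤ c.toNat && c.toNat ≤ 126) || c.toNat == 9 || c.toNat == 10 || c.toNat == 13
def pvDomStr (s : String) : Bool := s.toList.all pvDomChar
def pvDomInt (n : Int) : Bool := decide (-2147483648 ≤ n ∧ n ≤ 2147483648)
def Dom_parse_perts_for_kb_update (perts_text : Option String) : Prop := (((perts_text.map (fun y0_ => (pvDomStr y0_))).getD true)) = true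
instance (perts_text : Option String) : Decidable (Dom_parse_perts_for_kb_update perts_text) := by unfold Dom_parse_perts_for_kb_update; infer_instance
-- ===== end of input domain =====

set_option maxHeartbeats 2000000


-- One honest line: B re-decomposes A's single stateful line loop into two passes (segment, then
-- route by section) and keeps every solution section's content, where A drops solution content
-- not followed by a PROBLEM header; objective: alternative decomposition, same cost.

-- ===== PORT A =====
-- A's loop body: state = (current_section, section_content, issue_parts, proposed_solution)
def A_step : Option String × List String × List String × List String → String →
    Option String × List String × List String × List String
  | (cur, content, issue, sol), line =>
  let lu := PySem.Str.upper (PySem.Str.strip line)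
  if PySem.Str.isIn "PROBLEM_DESCRIPTION" lu || PySem.Str.isIn "PROBLEM DESCRIPTION" lu then
    let (issue, sol) :=
      if !content.isEmpty && cur.isSome then
        if cur == some "solution" then (issue, sol ++ content)
        else if cur == some "problem" || cur == some "error" || cur == some "root_cause" then
          (issue ++ content, sol)
        else (issue, sol)
      else (issue, sol)
    (some "problem", [], issue, sol)
  else if PySem.Str.isIn "ERROR_MESSAGE" lu || PySem.Str.isIn "ERROR MESSAGE" lu then
    let issue :=
      if !content.isEmpty && (cur == some "problem" || cur == some "error" || cur == some "root_cause") then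
        issue ++ content
      else issue
    (some "error", [], issue, sol)
  else if PySem.Str.isIn "ROOT_CAUSE" lu || PySem.Str.isIn "ROOT CAUSE" lu then
    let issue :=
      if !content.isEmpty && (cur == some "problem" || cur == some "error" || cur == some "root_cause") then
        issue ++ content
      else issue
    (some "root_cause", [], issue, sol)
  else if PySem.Str.isIn "SOLUTION_THAT_WORKED" lu || PySem.Str.isIn "SOLUTION THAT WORKED" lu then
    let issue :=
      if !content.isEmpty && (cur == some "problem" || cur == some "error" || cur == some "root_cause") then
        issue ++ content
      else issue
    (some "solution", [], issue, sol)
  else if PySem.Str.isIn "TROUBLESHOOTING" lu then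
    let issue :=
      if !content.isEmpty && (cur == some "problem" || cur == some "error" || cur == some "root_cause") then
        issue ++ content
      else issue
    (some "troubleshooting", [], issue, sol)
  else if PySem.Str.len (PySem.Str.strip line) != 0
      && !(PySem.Str.lower (PySem.Str.strip line) == "n/a"
           || PySem.Str.lower (PySem.Str.strip line) == "na"
           || PySem.Str.lower (PySem.Str.strip line) == "none") then
    (cur, content ++ [PySem.Str.strip line], issue, sol)
  else
    (cur, content, issue, sol)

def parse_perts_for_kb_update (perts_text : Option String) : String × String :=
  match perts_text with
  | none => ("", "")   -- Python A returns (None, None) here: outside Pre_ (not a String pair)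
  | some s =>
    if PySem.Str.len s == 0 then (s, s)
    else
      let lines := (PySem.Str.split? s "\n").getD []
      let (cur, content, issue, sol) := lines.foldl A_step (none, [], [], [])
      -- capture last section
      let (issue, sol) :=
        if !content.isEmpty then
          if cur == some "solution" then (issue, sol ++ content)
          else if cur == some "problem" || cur == some "error" || cur == some "root_cause" then
            (issue ++ content, sol)
          else (issue, sol)
        else (issue, sol)
      let issue_description :=
        if !issue.isEmpty then PySem.Str.strip (PySem.Str.join "\n" issue) else "Issue not specified"
      let proposed_steps :=
        if !sol.isEmpty then PySem.Str.strip (PySem.Str.join "\n" sol) else s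
      (issue_description, proposed_steps)

-- ===== PORT B =====
-- Source B's _classify: the section a header line opens, or none for a content line
def B_classify (lu : String) : Option String :=
  if PySem.Str.isIn "PROBLEM_DESCRIPTION" lu || PySem.Str.isIn "PROBLEM DESCRIPTION" lu then some "problem"
  else if PySem.Str.isIn "ERROR_MESSAGE" lu || PySem.Str.isIn "ERROR MESSAGE" lu then some "error"
  else if PySem.Str.isIn "ROOT_CAUSE" lu || PySem.Str.isIn "ROOT CAUSE" lu then some "root_cause"
  else if PySem.Str.isIn "SOLUTION_THAT_WORKED" lu || PySem.Str.isIn "SOLUTION THAT WORKED" lu then some "solution"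
  else if PySem.Str.isIn "TROUBLESHOOTING" lu then some "troubleshooting"
  else none

-- pass 1 loop body: state = (segments, cur_sec, cur_lines)
def B_segStep : List (Option String × List String) × Option String × List String → String →
    List (Option String × List String) × Option String × List String
  | (segs, cur, curLines), line =>
  let stripped := PySem.Str.strip line
  match B_classify (PySem.Str.upper stripped) with
  | some sec => (segs ++ [(cur, curLines)], some sec, [])
  | none =>
    if PySem.Str.len stripped != 0
        && !(PySem.Str.lower stripped == "n/a"
             || PySem.Str.lower stripped == "na"
             || PySem.Str.lower stripped == "none") then
      (segs, cur, curLines ++ [stripped])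
    else (segs, cur, curLines)

-- pass 2: route each segment's content by its section alone
def B_procSegs : List (Option String × List String) → List String → List String → List String × List String
  | [], issue, sol => (issue, sol)
  | (sec, content) :: rest, issue, sol =>
    if sec == some "problem" || sec == some "error" || sec == some "root_cause" then
      B_procSegs rest (issue ++ content) sol
    else if sec == some "solution" then
      B_procSegs rest issue (sol ++ content)
    else
      B_procSegs rest issue sol

def parse_perts_for_kb_update_alt (perts_text : Option String) : String × String :=
  match perts_text with
  | none => ("", "")   -- Python B returns (None, None) here: outside Pre_
  | some s =>
    if PySem.Str.len s == 0 then (s, s)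
    else
      let r := ((PySem.Str.split? s "\n").getD []).foldl B_segStep ([], none, [])
      let segments := r.1 ++ [(r.2.1, r.2.2)]
      let (issue_parts, proposed_solution) := B_procSegs segments [] []
      let issue_description :=
        if !issue_parts.isEmpty then PySem.Str.strip (PySem.Str.join "\n" issue_parts)
        else "Issue not specified"
      let proposed_steps :=
        if !proposed_solution.isEmpty then PySem.Str.strip (PySem.Str.join "\n" proposed_solution)
        else s
      (issue_description, proposed_steps)

-- ===== PRECONDITION & SPEC =====
-- Pre_ excludes only the input None, on which Python A returns (None, None) — not a pair of strings, unrepresentable in String × String.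
def Pre_parse_perts_for_kb_update (perts_text : Option String) : Prop := perts_text ≠ none
instance (perts_text : Option String) : Decidable (Pre_parse_perts_for_kb_update perts_text) := by unfold Pre_parse_perts_for_kb_update; infer_instance
def pvWitness_parse_perts_for_kb_update : Option String := some "PROBLEM_DESCRIPTION\nbad\nSOLUTION_THAT_WORKED\nfix"

-- D_ helpers: an independent scanner for the drop pattern, phrased directly as keyword
-- membership on each line (it never computes either program's output).
-- dHas u kws: the uppercased stripped line mentions one of the given section keywords.
def dHas (u : String) (kws : List String) : Bool := kws.any (fun k => PySem.Str.isIn k u)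

-- dropScan inSol pend lines = true iff some SOLUTION_THAT_WORKED section collects a content
-- line and is then closed by a non-PROBLEM section header (inSol: currently inside a solution
-- section; pend: it already has content).
def dropScan : Bool → Bool → List String → Bool
  | _, _, [] => false
  | inSol, pend, l :: ls =>
    let u := PySem.Str.upper (PySem.Str.strip l)
    if dHas u ["PROBLEM_DESCRIPTION", "PROBLEM DESCRIPTION"] then dropScan false false ls
    else if dHas u ["ERROR_MESSAGE", "ERROR MESSAGE", "ROOT_CAUSE", "ROOT CAUSE",
                    "SOLUTION_THAT_WORKED", "SOLUTION THAT WORKED", "TROUBLESHOOTING"] then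
      pend || dropScan (dHas u ["SOLUTION_THAT_WORKED", "SOLUTION THAT WORKED"]
                        && !dHas u ["ERROR_MESSAGE", "ERROR MESSAGE", "ROOT_CAUSE", "ROOT CAUSE"])
                false ls
    else if PySem.Str.len (PySem.Str.strip l) != 0
        && !(PySem.Str.lower (PySem.Str.strip l) == "n/a"
             || PySem.Str.lower (PySem.Str.strip l) == "na"
             || PySem.Str.lower (PySem.Str.strip l) == "none") then
      dropScan inSol inSol ls
    else dropScan inSol pend ls

-- On texts where a SOLUTION_THAT_WORKED section with content is followed by a non-PROBLEM section
-- header, A silently drops that solution content (its loop only flushes the solution buffer at a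
-- PROBLEM header or at end of text), often returning the whole text as proposed_steps; B keeps all
-- solution content, which is the intended proposed_steps value for the knowledge-base update.
def D_parse_perts_for_kb_update (perts_text : Option String) : Prop :=
  (perts_text.map (fun s => dropScan false false ((PySem.Str.split? s "\n").getD []))).getD false = true
instance (perts_text : Option String) : Decidable (D_parse_perts_for_kb_update perts_text) := by unfold D_parse_perts_for_kb_update; infer_instance

def Spec_parse_perts_for_kb_update (perts_text : Option String) (out : String × String) : Prop := ¬ D_parse_perts_for_kb_update perts_text → out = parse_perts_for_kb_update_alt perts_text
instance (perts_text : Option String) (out : String × String) : Decidable (Spec_parse_perts_for_kb_update perts_text out) := by unfold Spec_parse_perts_for_kb_update; infer_instance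

def pvDiffWitness_parse_perts_for_kb_update : Option String := some "SOLUTION_THAT_WORKED\nfix\nTROUBLESHOOTING"
def pvDiffWitnessOut_parse_perts_for_kb_update : (String × String) × (String × String) :=
  (("Issue not specified", "SOLUTION_THAT_WORKED\nfix\nTROUBLESHOOTING"), ("Issue not specified", "fix"))

-- ===== CLAIM (what is proved, stated in full; the proofs are below) =====
def Claim_unchanged_parse_perts_for_kb_update : Prop := ∀ (perts_text : Option String), Dom_parse_perts_for_kb_update perts_text → Pre_parse_perts_for_kb_update perts_text → Spec_parse_perts_for_kb_update perts_text (parse_perts_for_kb_update perts_text)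
def Claim_changed_parse_perts_for_kb_update : Prop := Dom_parse_perts_for_kb_update (pvDiffWitness_parse_perts_for_kb_update) ∧ Pre_parse_perts_for_kb_update (pvDiffWitness_parse_perts_for_kb_update) ∧ D_parse_perts_for_kb_update (pvDiffWitness_parse_perts_for_kb_update) ∧ parse_perts_for_kb_update (pvDiffWitness_parse_perts_for_kb_update) = pvDiffWitnessOut_parse_perts_for_kb_update.1 ∧ parse_perts_for_kb_update_alt (pvDiffWitness_parse_perts_for_kb_update) = pvDiffWitnessOut_parse_perts_for_kb_update.2 ∧ pvDiffWitnessOut_parse_perts_for_kb_update.1 ≠ pvDiffWitnessOut_parse_perts_for_kb_update.2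
def Claim_exact_parse_perts_for_kb_update : Prop := ∀ (perts_text : Option String), Dom_parse_perts_for_kb_update perts_text → Pre_parse_perts_for_kb_update perts_text → D_parse_perts_for_kb_update perts_text → parse_perts_for_kb_update perts_text ≠ parse_perts_for_kb_update_alt perts_text

-- ===== LEMMAS AND PROOFS =====

-- buildSegs lines cur content = the full segment list pass 1 produces from state (cur, content)
def buildSegs (lines : List String) (cur : Option String) (content : List String) :
    List (Option String × List String) :=
  let r := lines.foldl B_segStep ([], cur, content)
  r.1 ++ [(r.2.1, r.2.2)]

lemma segStep_factor (lines : List String) :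
    ∀ (s0 : List (Option String × List String)) (c : Option String) (cl : List String),
    lines.foldl B_segStep (s0, c, cl)
      = (s0 ++ (lines.foldl B_segStep ([], c, cl)).1,
         (lines.foldl B_segStep ([], c, cl)).2) := by
  induction lines with
  | nil => intro s0 c cl; simp
  | cons x rest ih =>
    intro s0 c cl
    simp only [List.foldl_cons]
    show rest.foldl B_segStep (B_segStep (s0, c, cl) x) = _
    rcases h : B_classify (PySem.Str.upper (PySem.Str.strip x)) with _ | sec
    · simp only [B_segStep, h]
      split
      · rw [ih]
      · rw [ih]
    · simp only [B_segStep, h, List.nil_append]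
      rw [ih (s0 ++ [(c, cl)]), ih [(c, cl)]]
      simp

lemma buildSegs_cons_header (x : String) (rest : List String) (cur : Option String)
    (content : List String) (sec : String)
    (h : B_classify (PySem.Str.upper (PySem.Str.strip x)) = some sec) :
    buildSegs (x :: rest) cur content = (cur, content) :: buildSegs rest (some sec) [] := by
  simp only [buildSegs, List.foldl_cons, B_segStep, h, List.nil_append]
  rw [segStep_factor rest [(cur, content)]]
  simp

lemma buildSegs_cons_content (x : String) (rest : List String) (cur : Option String)
    (content : List String)
    (h : B_classify (PySem.Str.upper (PySem.Str.strip x)) = none) :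
    buildSegs (x :: rest) cur content
      = buildSegs rest cur
          (if PySem.Str.len (PySem.Str.strip x) != 0
              && !(PySem.Str.lower (PySem.Str.strip x) == "n/a"
                   || PySem.Str.lower (PySem.Str.strip x) == "na"
                   || PySem.Str.lower (PySem.Str.strip x) == "none") then
            content ++ [PySem.Str.strip x] else content) := by
  simp only [buildSegs, List.foldl_cons, B_segStep, h]
  split <;> simp

lemma buildSegs_head (lines : List String) :
    ∀ (c : Option String) (cl : List String),
    ∃ cl' tl, buildSegs lines c cl = (c, cl') :: tl := by
  induction lines with
  | nil => intro c cl; exact ⟨cl, [], by simp [buildSegs]⟩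
  | cons x rest ih =>
    intro c cl
    rcases h : B_classify (PySem.Str.upper (PySem.Str.strip x)) with _ | sec
    · rw [buildSegs_cons_content x rest c cl h]
      exact ih c _
    · rw [buildSegs_cons_header x rest c cl sec h]
      exact ⟨cl, buildSegs rest (some sec) [], rfl⟩

-- A's last-section capture
def A_finish (st : Option String × List String × List String × List String) :
    List String × List String :=
  let (cur, content, issue, sol) := st
  if !content.isEmpty then
    if cur == some "solution" then (issue, sol ++ content)
    else if cur == some "problem" || cur == some "error" || cur == some "root_cause" then
      (issue ++ content, sol)
    else (issue, sol)
  else (issue, sol)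

-- segment-level characterisation of A's routing: solution content survives only when the
-- segment is last or followed by a PROBLEM segment
def A_procSegs : List (Option String × List String) → List String → List String → List String × List String
  | [], issue, sol => (issue, sol)
  | (sec, content) :: rest, issue, sol =>
    if sec == some "problem" || sec == some "error" || sec == some "root_cause" then
      A_procSegs rest (issue ++ content) sol
    else if sec == some "solution"
        && (match rest.head? with
            | none => true
            | some (sec', _) => sec' == some "problem") then
      A_procSegs rest issue (sol ++ content)
    else
      A_procSegs rest issue sol

-- the routing A performs at a flush point, written as one pair of conditionals
def routed (cur : Option String) (content issue sol : List String) (next : String) :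
    List String × List String :=
  (if !content.isEmpty && (cur == some "problem" || cur == some "error" || cur == some "root_cause") then
     issue ++ content else issue,
   if next == "problem" && (!content.isEmpty && cur == some "solution") then
     sol ++ content else sol)

lemma A_finish_eq (cur : Option String) (content issue sol : List String) :
    A_finish (cur, content, issue, sol) = routed cur content issue sol "problem" := by
  simp only [A_finish, routed]
  by_cases hce : content.isEmpty
  · rw [List.isEmpty_iff] at hce
    subst hce
    simp
  · rw [Bool.not_eq_true] at hce
    by_cases hsol : cur = some "solution"
    · subst hsol
      simp [hce]
    · have hS : (cur == some "solution") = false := by simp [hsol]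
      simp only [hce, hS, Bool.not_false, if_true, Bool.false_eq_true, if_false, Bool.true_and,
        Bool.and_false]
      split <;> simp

lemma flushP (cur : Option String) (content issue sol : List String) :
    (if !content.isEmpty && cur.isSome then
       if cur == some "solution" then (issue, sol ++ content)
       else if cur == some "problem" || cur == some "error" || cur == some "root_cause" then
         (issue ++ content, sol)
       else (issue, sol)
     else (issue, sol))
    = routed cur content issue sol "problem" := by
  simp only [routed]
  by_cases hce : content.isEmpty
  · rw [List.isEmpty_iff] at hce
    subst hce
    simp
  · rw [Bool.not_eq_true] at hce
    by_cases hsol : cur = some "solution"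
    · subst hsol
      simp [hce]
    · have hS : (cur == some "solution") = false := by simp [hsol]
      by_cases hmem : (cur == some "problem" || cur == some "error" || cur == some "root_cause") = true
      · have hsome : cur.isSome = true := by
          rcases Bool.or_eq_true_iff.mp hmem with h' | h'
          · rcases Bool.or_eq_true_iff.mp h' with h'' | h'' <;>
              (rw [beq_iff_eq] at h''; subst h''; rfl)
          · rw [beq_iff_eq] at h'; subst h'; rfl
        simp [hce, hS, hmem, hsome]
      · simp only [Bool.not_eq_true] at hmem
        simp only [hce, hS, hmem, Bool.not_false, Bool.true_and, Bool.false_eq_true, if_false,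
          Bool.and_false]
        split <;> simp

lemma procSegs_cons (cur : Option String) (content : List String)
    (segs : List (Option String × List String)) (issue sol : List String) (next : String)
    (hhead : segs.head?.map Prod.fst = some (some next) ∨ (segs = [] ∧ next = "problem")) :
    A_procSegs ((cur, content) :: segs) issue sol
      = A_procSegs segs ((routed cur content issue sol next).1) ((routed cur content issue sol next).2) := by
  have hlook : (match segs.head? with
      | none => true
      | some (sec', _) => sec' == some "problem") = (next == "problem") := by
    rcases hhead with h | ⟨h, h'⟩
    · rcases hh : segs.head? with _ | ⟨s', c'⟩
      · rw [hh] at h; simp at h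
      · rw [hh] at h
        simp only [Option.map_some, Option.some.injEq] at h
        subst h
        simp
    · subst h h'
      simp
  simp only [A_procSegs, hlook, routed]
  by_cases hmem : (cur == some "problem" || cur == some "error" || cur == some "root_cause") = true
  · have hS : (cur == some "solution") = false := by
      rcases Bool.or_eq_true_iff.mp hmem with h' | h'
      · rcases Bool.or_eq_true_iff.mp h' with h'' | h'' <;>
          (rw [beq_iff_eq] at h''; subst h''; rfl)
      · rw [beq_iff_eq] at h'; subst h'; rfl
    by_cases hce : content.isEmpty
    · rw [List.isEmpty_iff] at hce; subst hce
      simp [hmem, hS]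
    · rw [Bool.not_eq_true] at hce
      simp [hmem, hS, hce]
  · simp only [Bool.not_eq_true] at hmem
    by_cases hS : (cur == some "solution") = true
    · by_cases hce : content.isEmpty
      · rw [List.isEmpty_iff] at hce; subst hce
        simp [hmem, hS]
      · rw [Bool.not_eq_true] at hce
        by_cases hp : (next == "problem") = true
        · simp [hmem, hS, hce, hp]
        · simp only [Bool.not_eq_true] at hp
          simp [hmem, hS, hce, hp]
    · simp only [Bool.not_eq_true] at hS
      by_cases hce : content.isEmpty
      · rw [List.isEmpty_iff] at hce; subst hce
        simp [hmem, hS]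
      · rw [Bool.not_eq_true] at hce
        simp [hmem, hS, hce]

lemma A_step_header (x : String) (cur : Option String) (content issue sol : List String)
    (sec : String) (h : B_classify (PySem.Str.upper (PySem.Str.strip x)) = some sec) :
    A_step (cur, content, issue, sol) x
      = (some sec, [], (routed cur content issue sol sec).1, (routed cur content issue sol sec).2) := by
  simp only [B_classify] at h
  simp only [A_step]
  generalize hb1 : (PySem.Str.isIn "PROBLEM_DESCRIPTION" (PySem.Str.upper (PySem.Str.strip x))
      || PySem.Str.isIn "PROBLEM DESCRIPTION" (PySem.Str.upper (PySem.Str.strip x))) = b1 at h ⊢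
  generalize hb2 : (PySem.Str.isIn "ERROR_MESSAGE" (PySem.Str.upper (PySem.Str.strip x))
      || PySem.Str.isIn "ERROR MESSAGE" (PySem.Str.upper (PySem.Str.strip x))) = b2 at h ⊢
  generalize hb3 : (PySem.Str.isIn "ROOT_CAUSE" (PySem.Str.upper (PySem.Str.strip x))
      || PySem.Str.isIn "ROOT CAUSE" (PySem.Str.upper (PySem.Str.strip x))) = b3 at h ⊢
  generalize hb4 : (PySem.Str.isIn "SOLUTION_THAT_WORKED" (PySem.Str.upper (PySem.Str.strip x))
      || PySem.Str.isIn "SOLUTION THAT WORKED" (PySem.Str.upper (PySem.Str.strip x))) = b4 at h ⊢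
  generalize hb5 : PySem.Str.isIn "TROUBLESHOOTING" (PySem.Str.upper (PySem.Str.strip x)) = b5 at h ⊢
  cases b1
  · cases b2
    · cases b3
      · cases b4
        · cases b5
          · simp at h
          · simp only [reduceIte] at h ⊢
            cases h
            simp [routed]
        · simp only [reduceIte] at h ⊢
          cases h
          simp [routed]
      · simp only [reduceIte] at h ⊢
        cases h
        simp [routed]
    · simp only [reduceIte] at h ⊢
      cases h
      simp [routed]
  · simp only [reduceIte] at h ⊢
    cases h
    rw [flushP cur content issue sol]

-- A's loop + capture equals segment-level routing with lookahead, for every intermediate state.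
lemma main_invariant (lines : List String) :
    ∀ (cur : Option String) (content issue sol : List String),
    A_finish (lines.foldl A_step (cur, content, issue, sol))
      = A_procSegs (buildSegs lines cur content) issue sol := by
  induction lines with
  | nil =>
    intro cur content issue sol
    have hb : buildSegs [] cur content = [(cur, content)] := by simp [buildSegs]
    rw [hb, A_finish_eq,
      procSegs_cons cur content [] issue sol "problem" (Or.inr ⟨rfl, rfl⟩)]
    simp [A_procSegs]
  | cons x rest ih =>
    intro cur content issue sol
    simp only [List.foldl_cons]
    rcases h : B_classify (PySem.Str.upper (PySem.Str.strip x)) with _ | sec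
    · have hstep : A_step (cur, content, issue, sol) x
          = (cur,
             (if PySem.Str.len (PySem.Str.strip x) != 0
                  && !(PySem.Str.lower (PySem.Str.strip x) == "n/a"
                       || PySem.Str.lower (PySem.Str.strip x) == "na"
                       || PySem.Str.lower (PySem.Str.strip x) == "none") then
                content ++ [PySem.Str.strip x] else content), issue, sol) := by
        simp only [B_classify] at h
        simp only [A_step]
        split_ifs at h ⊢ <;> rfl
      rw [hstep, buildSegs_cons_content x rest cur content h, ih]
    · obtain ⟨cl', tl, htail⟩ := buildSegs_head rest (some sec) []
      rw [A_step_header x cur content issue sol sec h, ih,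
        buildSegs_cons_header x rest cur content sec h,
        procSegs_cons cur content (buildSegs rest (some sec) []) issue sol sec
          (Or.inl (by rw [htail]; rfl))]

-- goodSegs: every solution segment with content is last or followed by a PROBLEM segment
def goodSegs : List (Option String × List String) → Bool
  | [] => true
  | [_] => true
  | (s1, c1) :: (s2, c2) :: rest =>
      (!(s1 == some "solution" && !c1.isEmpty) || (s2 == some "problem"))
        && goodSegs ((s2, c2) :: rest)

-- one unfolding of dropScan, with the branch chosen by Source B's classifier
lemma dropScan_cons_eq (inSol pend : Bool) (l : String) (ls : List String) :
    dropScan inSol pend (l :: ls)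
      = (match B_classify (PySem.Str.upper (PySem.Str.strip l)) with
         | some k =>
           if k == "problem" then dropScan false false ls
           else pend || dropScan (k == "solution") false ls
         | none =>
           if PySem.Str.len (PySem.Str.strip l) != 0
               && !(PySem.Str.lower (PySem.Str.strip l) == "n/a"
                    || PySem.Str.lower (PySem.Str.strip l) == "na"
                    || PySem.Str.lower (PySem.Str.strip l) == "none") then
             dropScan inSol inSol ls
           else dropScan inSol pend ls) := by
  rw [dropScan]
  simp only [dHas, List.any_cons, List.any_nil, Bool.or_false, B_classify]
  generalize PySem.Str.isIn "PROBLEM_DESCRIPTION" (PySem.Str.upper (PySem.Str.strip l)) = p1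
  generalize PySem.Str.isIn "PROBLEM DESCRIPTION" (PySem.Str.upper (PySem.Str.strip l)) = p2
  generalize PySem.Str.isIn "ERROR_MESSAGE" (PySem.Str.upper (PySem.Str.strip l)) = e1
  generalize PySem.Str.isIn "ERROR MESSAGE" (PySem.Str.upper (PySem.Str.strip l)) = e2
  generalize PySem.Str.isIn "ROOT_CAUSE" (PySem.Str.upper (PySem.Str.strip l)) = r1
  generalize PySem.Str.isIn "ROOT CAUSE" (PySem.Str.upper (PySem.Str.strip l)) = r2
  generalize PySem.Str.isIn "SOLUTION_THAT_WORKED" (PySem.Str.upper (PySem.Str.strip l)) = s1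
  generalize PySem.Str.isIn "SOLUTION THAT WORKED" (PySem.Str.upper (PySem.Str.strip l)) = s2
  generalize PySem.Str.isIn "TROUBLESHOOTING" (PySem.Str.upper (PySem.Str.strip l)) = t
  cases p1 <;> cases p2 <;> cases e1 <;> cases e2 <;> cases r1 <;> cases r2 <;>
    cases s1 <;> cases s2 <;> cases t <;> simp

-- on good segment lists the lookahead routing and B's unconditional routing agree
lemma good_proc (segs : List (Option String × List String)) :
    ∀ issue sol, goodSegs segs = true → A_procSegs segs issue sol = B_procSegs segs issue sol := by
  induction segs with
  | nil => intro issue sol _; rfl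
  | cons hd rest ih =>
    intro issue sol hg
    obtain ⟨s1, c1⟩ := hd
    have hrest : goodSegs rest = true := by
      cases rest with
      | nil => rfl
      | cons h2 t2 =>
        obtain ⟨s2, c2⟩ := h2
        simp only [goodSegs, Bool.and_eq_true] at hg
        exact hg.2
    by_cases hmem : (s1 == some "problem" || s1 == some "error" || s1 == some "root_cause") = true
    · simp only [A_procSegs, B_procSegs, hmem, if_true]
      exact ih _ _ hrest
    · simp only [Bool.not_eq_true] at hmem
      by_cases hS : (s1 == some "solution") = true
      · by_cases hce : c1.isEmpty
        · rw [List.isEmpty_iff] at hce; subst hce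
          simp only [A_procSegs, B_procSegs, hmem, Bool.false_eq_true, hS,
            Bool.true_and, List.append_nil, ite_self]
          exact ih _ _ hrest
        · rw [Bool.not_eq_true] at hce
          have hlook : (match rest.head? with
              | none => true
              | some (sec', _) => sec' == some "problem") = true := by
            cases rest with
            | nil => rfl
            | cons h2 t2 =>
              obtain ⟨s2, c2⟩ := h2
              simp only [goodSegs, Bool.and_eq_true, Bool.or_eq_true, Bool.not_eq_true',
                Bool.and_eq_false_iff] at hg
              rcases hg.1 with h | h
              · rcases h with h | h
                · exact absurd hS (by simp [h])
                · simp [hce] at h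
              · simpa using h
          simp only [A_procSegs, B_procSegs, hmem, Bool.false_eq_true, if_false, hS, hlook,
            Bool.and_self, if_true]
          exact ih _ _ hrest
      · simp only [Bool.not_eq_true] at hS
        simp only [A_procSegs, B_procSegs, hmem, Bool.false_eq_true, if_false, hS, Bool.false_and]
        exact ih _ _ hrest

-- the produced segment list is good exactly when the scan finds no drop pattern
lemma dropScan_goodSegs (lines : List String) :
    ∀ (cur : Option String) (content : List String),
    goodSegs (buildSegs lines cur content)
      = !dropScan (cur == some "solution") (cur == some "solution" && !content.isEmpty) lines := by
  induction lines with
  | nil =>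
    intro cur content
    have hb : buildSegs [] cur content = [(cur, content)] := by simp [buildSegs]
    rw [hb]
    rfl
  | cons x rest ih =>
    intro cur content
    rcases h : B_classify (PySem.Str.upper (PySem.Str.strip x)) with _ | sec
    · -- content or filler line
      rw [buildSegs_cons_content x rest cur content h, dropScan_cons_eq, h]
      dsimp only []
      by_cases hc : (PySem.Str.len (PySem.Str.strip x) != 0
          && !(PySem.Str.lower (PySem.Str.strip x) == "n/a"
               || PySem.Str.lower (PySem.Str.strip x) == "na"
               || PySem.Str.lower (PySem.Str.strip x) == "none")) = true
      · rw [if_pos hc, if_pos hc, ih]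
        have : (cur == some "solution" && !(content ++ [PySem.Str.strip x]).isEmpty)
            = (cur == some "solution") := by simp
        rw [this]
      · rw [if_neg hc, if_neg hc, ih]
    · -- header line
      rw [buildSegs_cons_header x rest cur content sec h, dropScan_cons_eq, h]
      dsimp only []
      obtain ⟨cl', tl, htail⟩ := buildSegs_head rest (some sec) []
      rw [htail]
      by_cases hp : (sec == "problem") = true
      · rw [if_pos hp]
        rw [beq_iff_eq] at hp; subst hp
        have hgood := ih (some "problem") []
        rw [htail] at hgood
        simp only [goodSegs, Bool.and_eq_true]
        simp only [show ((some "problem" : Option String) == some "solution") = false by decide,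
          Bool.false_and, Bool.and_false] at hgood ⊢
        simp [hgood]
      · rw [if_neg hp]
        have hgood := ih (some sec) []
        rw [htail] at hgood
        have hflag : ((some sec : Option String) == some "solution") = (sec == "solution") := by
          simp
        rw [hflag] at hgood
        simp only [Bool.and_false, List.isEmpty_nil, Bool.not_true] at hgood
        have hpp : ((some sec : Option String) == some "problem") = false := by
          simpa using hp
        simp only [goodSegs, hpp, Bool.or_false, hgood, Bool.not_or]

-- ===== machinery for the tightness theorem =====

-- weight of a string list: total characters plus one separator per element
def Wt (xs : List String) : Nat := (xs.map (fun x => x.toList.length + 1)).sum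

lemma Wt_cons (x : String) (xs : List String) :
    Wt (x :: xs) = x.toList.length + 1 + Wt xs := by simp [Wt]

lemma Wt_append (a b : List String) : Wt (a ++ b) = Wt a + Wt b := by simp [Wt]

lemma sublist_Wt_le {a b : List String} (h : a.Sublist b) : Wt a ≤ Wt b := by
  induction h with
  | slnil => exact le_refl _
  | cons x _ ih => rw [Wt_cons]; omega
  | cons₂ x _ ih => rw [Wt_cons, Wt_cons]; omega

lemma sublist_Wt_lt {a b : List String} (h : a.Sublist b) (hl : a.length < b.length) :
    Wt a < Wt b := by
  induction h with
  | slnil => simp at hl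
  | cons x h ih =>
    have := sublist_Wt_le h
    rw [Wt_cons]; omega
  | cons₂ x h ih =>
    simp only [List.length_cons, Nat.add_lt_add_iff_right] at hl
    rw [Wt_cons, Wt_cons]
    have := ih hl
    omega

-- dropWhile leaves a head on which the predicate fails
lemma dropWhile_head?_false {α : Type} (p : α → Bool) (l : List α) (c : α)
    (h : (List.dropWhile p l).head? = some c) : p c = false := by
  have := List.head?_dropWhile_not p l
  rw [h] at this
  exact this

lemma rstrip_prefix (y : List Char) : PySem.Chars.rstrip y <+: y := by
  have h := List.dropWhile_suffix (l := y.reverse) PySem.Chars.isspace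
  have h2 := List.reverse_prefix.mpr h
  rw [List.reverse_reverse] at h2
  exact h2

lemma strip_length_le (y : List Char) : (PySem.Chars.strip y).length ≤ y.length := by
  have h1 := List.length_dropWhile_le PySem.Chars.isspace y
  have h2 := List.length_dropWhile_le PySem.Chars.isspace
      ((List.dropWhile PySem.Chars.isspace y).reverse)
  simp only [PySem.Chars.strip, PySem.Chars.rstrip, PySem.Chars.lstrip, List.length_reverse]
  simp only [List.length_reverse] at h2
  omega

lemma strip_head_false (y : List Char) (c : Char)
    (h : (PySem.Chars.strip y).head? = some c) : PySem.Chars.isspace c = false := by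
  obtain ⟨t, ht⟩ := rstrip_prefix (PySem.Chars.lstrip y)
  have hlh : (PySem.Chars.lstrip y).head? = some c := by
    rw [← ht, List.head?_append]
    rw [PySem.Chars.strip] at h
    rw [h]
    rfl
  exact dropWhile_head?_false _ _ _ hlh

lemma strip_getLast_false (y : List Char) (c : Char)
    (h : (PySem.Chars.strip y).getLast? = some c) : PySem.Chars.isspace c = false := by
  rw [PySem.Chars.strip, PySem.Chars.rstrip, List.getLast?_reverse] at h
  exact dropWhile_head?_false _ _ _ h

lemma strip_of_ends (y : List Char)
    (hh : ∀ c, y.head? = some c → PySem.Chars.isspace c = false)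
    (hl : ∀ c, y.getLast? = some c → PySem.Chars.isspace c = false) :
    PySem.Chars.strip y = y := by
  have h1 : PySem.Chars.lstrip y = y := by
    cases y with
    | nil => rfl
    | cons a t =>
      have := hh a rfl
      simp [PySem.Chars.lstrip, this]
  rw [PySem.Chars.strip, h1]
  rcases hy : y.reverse with _ | ⟨a, t⟩
  · have hnil : y = [] := by simpa using congrArg List.reverse hy
    simp [PySem.Chars.rstrip, hnil]
  · have ha : y.getLast? = some a := by
      rw [← List.head?_reverse, hy]
      rfl
    have hsp := hl a ha
    have : List.dropWhile PySem.Chars.isspace y.reverse = y.reverse := by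
      rw [hy]
      simp [hsp]
    rw [PySem.Chars.rstrip, this, List.reverse_reverse]

lemma strip_idem (y : List Char) :
    PySem.Chars.strip (PySem.Chars.strip y) = PySem.Chars.strip y :=
  strip_of_ends _ (strip_head_false y) (strip_getLast_false y)

-- a clean element: already stripped and nonempty
def StrOk (e : String) : Prop := PySem.Chars.strip e.toList = e.toList ∧ e.toList ≠ []

-- join length: one separator between consecutive pieces
lemma join_len : ∀ (xs : List String), xs ≠ [] →
    (PySem.Chars.join ['\n'] (xs.map String.toList)).length + 1 = Wt xs := by
  intro xs
  induction xs with
  | nil => intro h; exact absurd rfl h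
  | cons x rest ih =>
    intro _
    cases rest with
    | nil => simp [PySem.Chars.join_singleton, Wt]
    | cons y t =>
      have hr := ih (by simp)
      rw [List.map_cons, List.map_cons, PySem.Chars.join_cons_cons, Wt_cons]
      rw [List.map_cons] at hr
      simp only [List.length_append, List.length_singleton]
      omega

lemma join_ne_nil (xs : List String) (hne : xs ≠ [])
    (h1 : ∀ e ∈ xs, e.toList ≠ []) :
    PySem.Chars.join ['\n'] (xs.map String.toList) ≠ [] := by
  cases xs with
  | nil => exact absurd rfl hne
  | cons x rest =>
    have hx : x.toList ≠ [] := h1 x (by simp)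
    have hlen := join_len (x :: rest) (by simp)
    rw [Wt_cons] at hlen
    have hxl : 1 ≤ x.toList.length := by
      cases hxe : x.toList with
      | nil => exact absurd hxe hx
      | cons a b => simp
    intro hj
    rw [hj] at hlen
    have hW : 0 ≤ Wt rest := Nat.zero_le _
    simp only [List.length_nil] at hlen
    omega

lemma join_head_ok (xs : List String) (hne : xs ≠ []) (hok : ∀ e ∈ xs, StrOk e) :
    ∀ c, (PySem.Chars.join ['\n'] (xs.map String.toList)).head? = some c →
      PySem.Chars.isspace c = false := by
  cases xs with
  | nil => exact absurd rfl hne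
  | cons x rest =>
    intro c hc
    have hx := hok x (by simp)
    have hhead : x.toList.head? = some c := by
      cases rest with
      | nil =>
        rw [List.map_cons, List.map_nil, PySem.Chars.join_singleton] at hc
        exact hc
      | cons y t =>
        rw [List.map_cons, List.map_cons, PySem.Chars.join_cons_cons, List.append_assoc,
          List.head?_append] at hc
        cases hxl : x.toList.head? with
        | none =>
          rw [List.head?_eq_none_iff] at hxl
          exact absurd hxl hx.2
        | some d =>
          rw [hxl] at hc
          simp only [Option.some_or] at hc
          exact hc
    rw [← hx.1] at hhead
    exact strip_head_false _ _ hhead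

lemma join_last_ok : ∀ (xs : List String), xs ≠ [] → (∀ e ∈ xs, StrOk e) →
    ∀ c, (PySem.Chars.join ['\n'] (xs.map String.toList)).getLast? = some c →
      PySem.Chars.isspace c = false := by
  intro xs
  induction xs with
  | nil => intro h; exact absurd rfl h
  | cons x rest ih =>
    intro _ hok c hc
    cases rest with
    | nil =>
      rw [List.map_cons, List.map_nil, PySem.Chars.join_singleton] at hc
      have hx := hok x (by simp)
      rw [← hx.1] at hc
      exact strip_getLast_false _ _ hc
    | cons y t =>
      have hokr : ∀ e ∈ y :: t, StrOk e := fun e he => hok e (by simp [he])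
      have hJ : PySem.Chars.join ['\n'] (y.toList :: List.map String.toList t) ≠ [] := by
        have := join_ne_nil (y :: t) (by simp) (fun e he => (hokr e he).2)
        simpa using this
      rw [List.map_cons, List.map_cons, PySem.Chars.join_cons_cons, List.append_assoc,
        List.getLast?_append, List.getLast?_append] at hc
      cases hJl : (PySem.Chars.join ['\n'] (y.toList :: List.map String.toList t)).getLast? with
      | none => exact absurd (List.getLast?_eq_none_iff.mp hJl) hJ
      | some d =>
        rw [hJl] at hc
        have hdc : d = c := by simpa using hc
        subst hdc
        apply ih (by simp) hokr d
        rw [List.map_cons]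
        exact hJl

lemma join_strip_ok (xs : List String) (hne : xs ≠ []) (hok : ∀ e ∈ xs, StrOk e) :
    PySem.Chars.strip (PySem.Chars.join ['\n'] (xs.map String.toList))
      = PySem.Chars.join ['\n'] (xs.map String.toList) :=
  strip_of_ends _ (join_head_ok xs hne hok) (join_last_ok xs hne hok)

-- ===== split?/join are inverse (characterisation of the fueled splitOn.go) =====

lemma go_ne_nil (sep : List Char) : ∀ (fuel : Nat) (l cur : List Char)
    (acc : List (List Char)), PySem.Chars.splitOn.go sep fuel l cur acc ≠ [] := by
  intro fuel
  induction fuel with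
  | zero => intro l cur acc; simp [PySem.Chars.splitOn.go]
  | succ f ih =>
    intro l cur acc
    cases l with
    | nil => simp [PySem.Chars.splitOn.go]
    | cons c rest =>
      simp only [PySem.Chars.splitOn.go]
      split
      · exact ih _ _ _
      · exact ih _ _ _

lemma go_acc (sep : List Char) : ∀ (fuel : Nat) (l cur : List Char)
    (acc : List (List Char)),
    PySem.Chars.splitOn.go sep fuel l cur acc
      = acc.reverse ++ PySem.Chars.splitOn.go sep fuel l cur [] := by
  intro fuel
  induction fuel with
  | zero => intro l cur acc; simp [PySem.Chars.splitOn.go]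
  | succ f ih =>
    intro l cur acc
    cases l with
    | nil => simp [PySem.Chars.splitOn.go]
    | cons c rest =>
      simp only [PySem.Chars.splitOn.go]
      by_cases hp : sep.isPrefixOf (c :: rest) = true
      · rw [if_pos hp, if_pos hp, ih _ _ (cur.reverse :: acc), ih _ _ [cur.reverse]]
        simp
      · rw [if_neg hp, if_neg hp, ih _ _ acc]

lemma go_join (sep : List Char) (hsep : sep ≠ []) : ∀ (fuel : Nat) (l cur : List Char),
    l.length < fuel →
    PySem.Chars.join sep (PySem.Chars.splitOn.go sep fuel l cur [])
      = cur.reverse ++ l := by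
  intro fuel
  induction fuel with
  | zero => intro l cur h; omega
  | succ f ih =>
    intro l cur hlen
    cases l with
    | nil => simp [PySem.Chars.splitOn.go, PySem.Chars.join_singleton]
    | cons c rest =>
      simp only [PySem.Chars.splitOn.go]
      by_cases hp : sep.isPrefixOf (c :: rest) = true
      · rw [if_pos hp, go_acc]
        have hsl : 1 ≤ sep.length := by
          cases hse : sep with
          | nil => exact absurd hse hsep
          | cons a b => simp
        have hdl : (List.drop sep.length (c :: rest)).length < f := by
          rw [List.length_drop]
          simp only [List.length_cons] at hlen ⊢
          omega
        have htail := ih (List.drop sep.length (c :: rest)) [] hdl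
        rcases hgo : PySem.Chars.splitOn.go sep f (List.drop sep.length (c :: rest)) [] []
            with _ | ⟨p, ps⟩
        · exact absurd hgo (go_ne_nil sep f _ _ _)
        · rw [hgo] at htail
          simp only [List.reverse_nil, List.nil_append] at htail
          simp only [List.reverse_cons, List.reverse_nil, List.nil_append,
            List.singleton_append]
          rw [PySem.Chars.join_cons_cons, htail]
          obtain ⟨t, ht⟩ := List.isPrefixOf_iff_prefix.mp hp
          rw [← ht, List.drop_left]
          simp [List.append_assoc]
      · rw [if_neg hp]
        have hr : rest.length < f := by
          simp only [List.length_cons] at hlen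
          omega
        rw [ih rest (c :: cur) hr]
        simp

lemma splitOn_join (s : List Char) :
    PySem.Chars.join ['\n'] (PySem.Chars.splitOn s ['\n']) = s := by
  rw [PySem.Chars.splitOn]
  have := go_join ['\n'] (by simp) (s.length + 1) s [] (by omega)
  simpa using this

lemma splitOn_ne_nil (s : List Char) : PySem.Chars.splitOn s ['\n'] ≠ [] := by
  rw [PySem.Chars.splitOn]
  exact go_ne_nil _ _ _ _ _

-- ===== segment-level content accounting =====

def allContents : List (Option String × List String) → List String
  | [] => []
  | (_, c) :: rest => c ++ allContents rest

def solContents : List (Option String × List String) → List String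
  | [] => []
  | (sec, c) :: rest => (if sec == some "solution" then c else []) ++ solContents rest

def keptContents : List (Option String × List String) → List String
  | [] => []
  | (sec, c) :: rest =>
      (if sec == some "solution"
          && (match rest.head? with
              | none => true
              | some (sec', _) => sec' == some "problem") then c else [])
        ++ keptContents rest

lemma issue_not_sol {sec : Option String}
    (h : (sec == some "problem" || sec == some "error" || sec == some "root_cause") = true) :
    (sec == some "solution") = false := by
  rcases Bool.or_eq_true_iff.mp h with h' | h'
  · rcases Bool.or_eq_true_iff.mp h' with h'' | h'' <;>
      (rw [beq_iff_eq] at h''; subst h''; decide)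
  · rw [beq_iff_eq] at h'; subst h'; decide

lemma B_procSegs_snd : ∀ (segs : List (Option String × List String)) (issue sol : List String),
    (B_procSegs segs issue sol).2 = sol ++ solContents segs := by
  intro segs
  induction segs with
  | nil => intro issue sol; simp [B_procSegs, solContents]
  | cons hd rest ih =>
    intro issue sol
    obtain ⟨sec, c⟩ := hd
    by_cases hmem : (sec == some "problem" || sec == some "error" || sec == some "root_cause") = true
    · have hs := issue_not_sol hmem
      simp only [B_procSegs, hmem, if_true, solContents, hs, Bool.false_eq_true, if_false,
        List.nil_append]
      exact ih _ _
    · simp only [Bool.not_eq_true] at hmem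
      by_cases hs : (sec == some "solution") = true
      · simp only [B_procSegs, hmem, Bool.false_eq_true, if_false, hs, if_true, solContents]
        rw [ih]
        simp [List.append_assoc]
      · simp only [Bool.not_eq_true] at hs
        simp only [B_procSegs, hmem, hs, Bool.false_eq_true, if_false, solContents,
          List.nil_append]
        exact ih _ _

lemma A_procSegs_snd : ∀ (segs : List (Option String × List String)) (issue sol : List String),
    (A_procSegs segs issue sol).2 = sol ++ keptContents segs := by
  intro segs
  induction segs with
  | nil => intro issue sol; simp [A_procSegs, keptContents]
  | cons hd rest ih =>
    intro issue sol
    obtain ⟨sec, c⟩ := hd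
    by_cases hmem : (sec == some "problem" || sec == some "error" || sec == some "root_cause") = true
    · have hs := issue_not_sol hmem
      simp only [A_procSegs, hmem, if_true, keptContents, hs, Bool.false_and,
        Bool.false_eq_true, if_false, List.nil_append]
      exact ih _ _
    · simp only [Bool.not_eq_true] at hmem
      by_cases hcond : (sec == some "solution"
          && (match rest.head? with
              | none => true
              | some (sec', _) => sec' == some "problem")) = true
      · simp only [A_procSegs, hmem, Bool.false_eq_true, if_false, hcond, if_true, keptContents]
        rw [ih]
        simp [List.append_assoc]
      · simp only [Bool.not_eq_true] at hcond
        simp only [A_procSegs, hmem, hcond, Bool.false_eq_true, if_false, keptContents,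
          List.nil_append]
        exact ih _ _

lemma solContents_sublist_all : ∀ (segs : List (Option String × List String)),
    (solContents segs).Sublist (allContents segs) := by
  intro segs
  induction segs with
  | nil => exact List.Sublist.refl _
  | cons hd rest ih =>
    obtain ⟨sec, c⟩ := hd
    simp only [solContents, allContents]
    by_cases hs : (sec == some "solution") = true
    · rw [if_pos hs]
      exact ih.append_left c
    · rw [if_neg hs, List.nil_append]
      exact ih.trans (List.sublist_append_right c (allContents rest))

lemma kept_sublist_sol : ∀ (segs : List (Option String × List String)),
    (keptContents segs).Sublist (solContents segs) := by
  intro segs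
  induction segs with
  | nil => exact List.Sublist.refl _
  | cons hd rest ih =>
    obtain ⟨sec, c⟩ := hd
    simp only [keptContents, solContents]
    by_cases hcond : (sec == some "solution"
        && (match rest.head? with
            | none => true
            | some (sec', _) => sec' == some "problem")) = true
    · have h1 : (sec == some "solution") = true := by
        have h2 := hcond
        rw [Bool.and_eq_true] at h2
        exact h2.1
      rw [if_pos hcond, if_pos h1]
      exact ih.append_left c
    · rw [if_neg hcond, List.nil_append]
      exact ih.trans (List.sublist_append_right _ (solContents rest))

lemma goodSegs_cons_cons (s1 : Option String) (c1 : List String)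
    (s2 : Option String) (c2 : List String) (t : List (Option String × List String)) :
    goodSegs ((s1, c1) :: (s2, c2) :: t)
      = ((!(s1 == some "solution" && !c1.isEmpty) || (s2 == some "problem"))
          && goodSegs ((s2, c2) :: t)) := rfl

lemma keptContents_cons (sec : Option String) (c : List String)
    (rest : List (Option String × List String)) :
    keptContents ((sec, c) :: rest)
      = (if sec == some "solution"
            && (match rest.head? with
                | none => true
                | some (sec', _) => sec' == some "problem") then c else [])
          ++ keptContents rest := rfl

lemma solContents_cons (sec : Option String) (c : List String)
    (rest : List (Option String × List String)) :
    solContents ((sec, c) :: rest)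
      = (if sec == some "solution" then c else []) ++ solContents rest := rfl

lemma good_false_length : ∀ (segs : List (Option String × List String)),
    goodSegs segs = false → (keptContents segs).length < (solContents segs).length := by
  intro segs
  induction segs with
  | nil => intro h; simp [goodSegs] at h
  | cons hd rest ih =>
    obtain ⟨s1, c1⟩ := hd
    cases rest with
    | nil => intro h; simp [goodSegs] at h
    | cons hd2 t =>
      obtain ⟨s2, c2⟩ := hd2
      intro h
      rw [goodSegs_cons_cons] at h
      have hsub := (kept_sublist_sol ((s2, c2) :: t)).length_le
      by_cases hkk : (s1 == some "solution") = true
      · by_cases hp2 : (s2 == some "problem") = true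
        · have hcond : (s1 == some "solution"
              && (match ((s2, c2) :: t).head? with
                  | none => true
                  | some (sec', _) => sec' == some "problem")) = true := by
            simp [hkk, hp2]
          have hH : (!(s1 == some "solution" && !c1.isEmpty) || (s2 == some "problem")) = true := by
            simp [hp2]
          rw [hH, Bool.true_and] at h
          have hI := ih h
          rw [keptContents_cons, solContents_cons, if_pos hcond, if_pos hkk]
          simp only [List.length_append]
          omega
        · by_cases hc1 : c1.isEmpty = true
          · rw [List.isEmpty_iff] at hc1
            subst hc1
            have hH : (!(s1 == some "solution" && !([] : List String).isEmpty)
                || (s2 == some "problem")) = true := by simp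
            rw [hH, Bool.true_and] at h
            have hI := ih h
            rw [keptContents_cons, solContents_cons]
            simp only [ite_self, List.length_append, List.length_nil]
            omega
          · have hcond : (s1 == some "solution"
                && (match ((s2, c2) :: t).head? with
                    | none => true
                    | some (sec', _) => sec' == some "problem")) = false := by
              simp [hp2]
            have hc1l : 1 ≤ c1.length := by
              cases hce : c1 with
              | nil => rw [hce] at hc1; simp at hc1
              | cons a b => simp
            rw [keptContents_cons, solContents_cons, if_pos hkk]
            simp only [hcond, Bool.false_eq_true, if_false, List.nil_append,
              List.length_append]
            omega
      · have hkk' : (s1 == some "solution") = false := by simpa using hkk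
        have hH : (!(s1 == some "solution" && !c1.isEmpty) || (s2 == some "problem")) = true := by
          simp [hkk']
        rw [hH, Bool.true_and] at h
        have hI := ih h
        rw [keptContents_cons, solContents_cons]
        simp only [hkk', Bool.false_and, Bool.false_eq_true, if_false, List.nil_append]
        exact hI

-- every content element produced by pass 1 is a stripped, nonempty line
lemma buildSegs_allOk : ∀ (lines : List String) (cur : Option String) (content : List String),
    (∀ e ∈ content, StrOk e) →
    ∀ e ∈ allContents (buildSegs lines cur content), StrOk e := by
  intro lines
  induction lines with
  | nil =>
    intro cur content hok e he
    have hb : buildSegs [] cur content = [(cur, content)] := by simp [buildSegs]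
    rw [hb] at he
    simp only [allContents, List.append_nil] at he
    exact hok e he
  | cons x rest ih =>
    intro cur content hok e he
    rcases h : B_classify (PySem.Str.upper (PySem.Str.strip x)) with _ | sec
    · rw [buildSegs_cons_content x rest cur content h] at he
      by_cases hc : (PySem.Str.len (PySem.Str.strip x) != 0
          && !(PySem.Str.lower (PySem.Str.strip x) == "n/a"
               || PySem.Str.lower (PySem.Str.strip x) == "na"
               || PySem.Str.lower (PySem.Str.strip x) == "none")) = true
      · rw [if_pos hc] at he
        refine ih cur _ ?_ e he
        intro e' he'
        rcases List.mem_append.mp he' with h' | h'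
        · exact hok e' h'
        · have he'' : e' = PySem.Str.strip x := by simpa using h'
          subst he''
          constructor
          · rw [PySem.Str.toList_strip]
            exact strip_idem _
          · have hlen : (PySem.Str.len (PySem.Str.strip x) != 0) = true := by
              have h2 := hc
              rw [Bool.and_eq_true] at h2
              exact h2.1
            rw [bne_iff_ne] at hlen
            rw [PySem.Str.len_eq] at hlen
            intro hnil
            rw [PySem.Str.toList_strip] at hnil
            rw [PySem.Str.toList_strip] at hlen
            rw [hnil] at hlen
            simp at hlen
      · rw [if_neg hc] at he
        exact ih cur content hok e he
    · rw [buildSegs_cons_header x rest cur content sec h] at he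
      simp only [allContents] at he
      rcases List.mem_append.mp he with h' | h'
      · exact hok e h'
      · exact ih (some sec) [] (by simp) e h'

-- ===== line-level accounting =====

def hCount (lines : List String) : Nat :=
  lines.countP (fun l => (B_classify (PySem.Str.upper (PySem.Str.strip l))).isSome)

lemma hCount_cons_hdr {x : String} {rest : List String} {sec : String}
    (h : B_classify (PySem.Str.upper (PySem.Str.strip x)) = some sec) :
    hCount (x :: rest) = hCount rest + 1 := by
  simp [hCount, h]

lemma hCount_cons_not {x : String} {rest : List String}
    (h : B_classify (PySem.Str.upper (PySem.Str.strip x)) = none) :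
    hCount (x :: rest) = hCount rest := by
  simp [hCount, h]

lemma hdr_len (x : String) (sec : String)
    (h : B_classify (PySem.Str.upper (PySem.Str.strip x)) = some sec) :
    1 ≤ x.toList.length := by
  have hkw : ∃ kw : String, kw.toList ≠ []
      ∧ PySem.Str.isIn kw (PySem.Str.upper (PySem.Str.strip x)) = true := by
    simp only [B_classify] at h
    split_ifs at h with h1 h2 h3 h4 h5
    · rcases Bool.or_eq_true_iff.mp h1 with hk | hk
      · exact ⟨"PROBLEM_DESCRIPTION", by decide, hk⟩
      · exact ⟨"PROBLEM DESCRIPTION", by decide, hk⟩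
    · rcases Bool.or_eq_true_iff.mp h2 with hk | hk
      · exact ⟨"ERROR_MESSAGE", by decide, hk⟩
      · exact ⟨"ERROR MESSAGE", by decide, hk⟩
    · rcases Bool.or_eq_true_iff.mp h3 with hk | hk
      · exact ⟨"ROOT_CAUSE", by decide, hk⟩
      · exact ⟨"ROOT CAUSE", by decide, hk⟩
    · rcases Bool.or_eq_true_iff.mp h4 with hk | hk
      · exact ⟨"SOLUTION_THAT_WORKED", by decide, hk⟩
      · exact ⟨"SOLUTION THAT WORKED", by decide, hk⟩
    · exact ⟨"TROUBLESHOOTING", by decide, h5⟩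
  obtain ⟨kw, hkne, hin⟩ := hkw
  have hinf := (PySem.Str.isIn_iff_infix _ _).mp hin
  have hkl : 1 ≤ kw.toList.length := by
    cases hke : kw.toList with
    | nil => exact absurd hke hkne
    | cons a b => simp
  have hle := hinf.length_le
  rw [PySem.Str.toList_upper, PySem.Str.toList_strip] at hle
  simp only [PySem.Chars.upper, List.length_map] at hle
  have hsl := strip_length_le x.toList
  omega

lemma countP_weight : ∀ (lines : List String), 2 * hCount lines ≤ Wt lines := by
  intro lines
  induction lines with
  | nil => simp [hCount, Wt]
  | cons x rest ih =>
    rcases h : B_classify (PySem.Str.upper (PySem.Str.strip x)) with _ | sec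
    · rw [hCount_cons_not h, Wt_cons]; omega
    · rw [hCount_cons_hdr h, Wt_cons]
      have := hdr_len x sec h
      omega

lemma build_weight : ∀ (lines : List String) (cur : Option String) (content : List String),
    Wt (allContents (buildSegs lines cur content)) + hCount lines ≤ Wt content + Wt lines := by
  intro lines
  induction lines with
  | nil =>
    intro cur content
    have hb : buildSegs [] cur content = [(cur, content)] := by simp [buildSegs]
    rw [hb]
    simp [allContents, hCount, Wt]
  | cons x rest ih =>
    intro cur content
    rcases h : B_classify (PySem.Str.upper (PySem.Str.strip x)) with _ | sec
    · rw [buildSegs_cons_content x rest cur content h, hCount_cons_not h, Wt_cons]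
      by_cases hc : (PySem.Str.len (PySem.Str.strip x) != 0
          && !(PySem.Str.lower (PySem.Str.strip x) == "n/a"
               || PySem.Str.lower (PySem.Str.strip x) == "na"
               || PySem.Str.lower (PySem.Str.strip x) == "none")) = true
      · rw [if_pos hc]
        have hihs := ih cur (content ++ [PySem.Str.strip x])
        have hW : Wt (content ++ [PySem.Str.strip x]) ≤ Wt content + (x.toList.length + 1) := by
          rw [Wt_append]
          have hone : Wt [PySem.Str.strip x] ≤ x.toList.length + 1 := by
            simp only [Wt, List.map_cons, List.map_nil, List.sum_cons, List.sum_nil]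
            have hsl := strip_length_le x.toList
            rw [PySem.Str.toList_strip]
            omega
          omega
        omega
      · rw [if_neg hc]
        have := ih cur content
        omega
    · rw [buildSegs_cons_header x rest cur content sec h, hCount_cons_hdr h, Wt_cons]
      simp only [allContents, Wt_append]
      have hih := ih (some sec) []
      have hWnil : Wt ([] : List String) = 0 := rfl
      omega

lemma hCount_ge_one : ∀ (lines : List String) (inSol pend : Bool),
    dropScan inSol pend lines = true → 1 ≤ hCount lines := by
  intro lines
  induction lines with
  | nil => intro _ _ h; exact absurd h (by simp [dropScan])
  | cons x rest ih =>
    intro inSol pend h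
    rcases hb : B_classify (PySem.Str.upper (PySem.Str.strip x)) with _ | sec
    · rw [hCount_cons_not hb]
      rw [dropScan_cons_eq, hb] at h
      dsimp only [] at h
      by_cases hc : (PySem.Str.len (PySem.Str.strip x) != 0
          && !(PySem.Str.lower (PySem.Str.strip x) == "n/a"
               || PySem.Str.lower (PySem.Str.strip x) == "na"
               || PySem.Str.lower (PySem.Str.strip x) == "none")) = true
      · rw [if_pos hc] at h; exact ih _ _ h
      · rw [if_neg hc] at h; exact ih _ _ h
    · rw [hCount_cons_hdr hb]; omega

lemma hCount_ge_two : ∀ (lines : List String) (inSol : Bool),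
    dropScan inSol false lines = true →
    2 - (if inSol = true then 1 else 0) ≤ hCount lines := by
  intro lines
  induction lines with
  | nil => intro _ h; exact absurd h (by simp [dropScan])
  | cons x rest ih =>
    intro inSol h
    rcases hb : B_classify (PySem.Str.upper (PySem.Str.strip x)) with _ | sec
    · rw [hCount_cons_not hb]
      rw [dropScan_cons_eq, hb] at h
      dsimp only [] at h
      by_cases hc : (PySem.Str.len (PySem.Str.strip x) != 0
          && !(PySem.Str.lower (PySem.Str.strip x) == "n/a"
               || PySem.Str.lower (PySem.Str.strip x) == "na"
               || PySem.Str.lower (PySem.Str.strip x) == "none")) = true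
      · rw [if_pos hc] at h
        by_cases hi : inSol = true
        · rw [hi] at h
          have := hCount_ge_one rest true true h
          rw [if_pos hi]
          omega
        · simp only [Bool.not_eq_true] at hi
          rw [hi] at h
          have := ih false h
          simp only [Bool.false_eq_true, if_false] at this
          rw [hi]
          simp only [Bool.false_eq_true, if_false]
          omega
      · rw [if_neg hc] at h
        exact ih inSol h
    · rw [hCount_cons_hdr hb]
      rw [dropScan_cons_eq, hb] at h
      dsimp only [] at h
      by_cases hp : (sec == "problem") = true
      · rw [if_pos hp] at h
        have := ih false h
        simp only [Bool.false_eq_true, if_false] at this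
        split <;> omega
      · rw [if_neg hp] at h
        simp only [Bool.false_or] at h
        have := ih (sec == "solution") h
        have h1 : 1 ≤ hCount rest := by
          by_cases hs : (sec == "solution") = true <;> simp [hs] at this <;> omega
        split <;> omega

-- ===== the strict comparison of the two solution outputs =====

lemma tight_core (s : String) (lines : List String)
    (hjoin_s : PySem.Chars.join ['\n'] (lines.map String.toList) = s.toList)
    (hds : dropScan false false lines = true) :
    (if !(keptContents (buildSegs lines none [])).isEmpty
       then PySem.Str.strip (PySem.Str.join "\n" (keptContents (buildSegs lines none [])))
       else s)
    ≠ (if !(solContents (buildSegs lines none [])).isEmpty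
       then PySem.Str.strip (PySem.Str.join "\n" (solContents (buildSegs lines none [])))
       else s) := by
  have hsepl : ("\n" : String).toList = ['\n'] := rfl
  have hgood : goodSegs (buildSegs lines none []) = false := by
    rw [dropScan_goodSegs]
    simp only [show ((none : Option String) == some "solution") = false from rfl,
      Bool.false_and]
    rw [hds]
    rfl
  have hkl := good_false_length _ hgood
  have hsolne : solContents (buildSegs lines none []) ≠ [] := by
    intro hnil
    rw [hnil] at hkl
    simp at hkl
  have hok : ∀ e ∈ allContents (buildSegs lines none []), StrOk e :=
    buildSegs_allOk lines none [] (by simp)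
  have hok_sol : ∀ e ∈ solContents (buildSegs lines none []), StrOk e :=
    fun e he => hok e ((solContents_sublist_all _).subset he)
  have hBne : (!(solContents (buildSegs lines none [])).isEmpty) = true := by
    simp [hsolne]
  rw [if_pos hBne]
  -- length of the B-side output
  have hlenB : (PySem.Str.strip (PySem.Str.join "\n"
        (solContents (buildSegs lines none [])))).toList.length + 1
      = Wt (solContents (buildSegs lines none [])) := by
    rw [PySem.Str.toList_strip, PySem.Str.toList_join, hsepl,
      join_strip_ok _ hsolne hok_sol]
    exact join_len _ hsolne
  by_cases hke : (keptContents (buildSegs lines none [])).isEmpty = true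
  · -- A keeps no solution content and falls back to the whole text
    rw [List.isEmpty_iff] at hke
    rw [hke]
    simp only [List.isEmpty_nil, Bool.not_true, Bool.false_eq_true, if_false]
    -- s is strictly longer than B's output
    have hlne : lines ≠ [] := by
      intro hnil
      rw [hnil] at hds
      simp [dropScan] at hds
    have hWs : s.toList.length + 1 = Wt lines := by
      rw [← hjoin_s]
      exact join_len _ hlne
    have hWsol : Wt (solContents (buildSegs lines none []))
        ≤ Wt (allContents (buildSegs lines none [])) :=
      sublist_Wt_le (solContents_sublist_all _)
    have hbw := build_weight lines none []
    have h2 : 2 ≤ hCount lines := by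
      have := hCount_ge_two lines false hds
      simpa using this
    have hWnil : Wt ([] : List String) = 0 := rfl
    intro heq
    have := congrArg (fun t => t.toList.length) heq
    simp only [] at this
    omega
  · -- both outputs are joins of stripped lines; A's list is strictly smaller
    simp only [Bool.not_eq_true] at hke
    have hkne : keptContents (buildSegs lines none []) ≠ [] := by
      intro hnil
      rw [hnil] at hke
      simp at hke
    have hok_kept : ∀ e ∈ keptContents (buildSegs lines none []), StrOk e :=
      fun e he => hok_sol e ((kept_sublist_sol _).subset he)
    have hAne : (!(keptContents (buildSegs lines none [])).isEmpty) = true := by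
      simp [hkne]
    rw [if_pos hAne]
    have hlenA : (PySem.Str.strip (PySem.Str.join "\n"
          (keptContents (buildSegs lines none [])))).toList.length + 1
        = Wt (keptContents (buildSegs lines none [])) := by
      rw [PySem.Str.toList_strip, PySem.Str.toList_join, hsepl,
        join_strip_ok _ hkne hok_kept]
      exact join_len _ hkne
    have hWlt := sublist_Wt_lt (kept_sublist_sol _) hkl
    intro heq
    have := congrArg (fun t => t.toList.length) heq
    simp only [] at this
    omega

-- ===== VERDICT (by name: the statements are the Claim_ definitions above) =====
theorem parse_perts_for_kb_update_spec : Claim_unchanged_parse_perts_for_kb_update := by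
  intro perts_text _ hpre
  unfold Spec_parse_perts_for_kb_update
  intro hnd
  match perts_text with
  | none => exact absurd rfl hpre
  | some s =>
    simp only [parse_perts_for_kb_update, parse_perts_for_kb_update_alt]
    by_cases he : (PySem.Str.len s == 0) = true
    · rw [if_pos he, if_pos he]
    · rw [if_neg he, if_neg he]
      have hds : dropScan false false ((PySem.Str.split? s "\n").getD []) = false := by
        simp only [D_parse_perts_for_kb_update, Option.map_some, Option.getD_some,
          Bool.not_eq_true] at hnd
        exact hnd
      have hgood : goodSegs (buildSegs ((PySem.Str.split? s "\n").getD []) none []) = true := by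
        rw [dropScan_goodSegs]
        simp only [show ((none : Option String) == some "solution") = false by decide,
          Bool.false_and]
        rw [hds]
        rfl
      have hmain := main_invariant ((PySem.Str.split? s "\n").getD []) none [] [] []
      have hAB : A_procSegs (buildSegs ((PySem.Str.split? s "\n").getD []) none []) [] []
          = B_procSegs (buildSegs ((PySem.Str.split? s "\n").getD []) none []) [] [] :=
        good_proc _ [] [] hgood
      exact congrArg
        (fun p : List String × List String =>
          ((if !p.1.isEmpty then PySem.Str.strip (PySem.Str.join "\n" p.1) else "Issue not specified"),
           (if !p.2.isEmpty then PySem.Str.strip (PySem.Str.join "\n" p.2) else s)))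
        (hmain.trans hAB)

theorem parse_perts_for_kb_update_changed : Claim_changed_parse_perts_for_kb_update := by
  unfold Claim_changed_parse_perts_for_kb_update; decide

theorem parse_perts_for_kb_update_tight : Claim_exact_parse_perts_for_kb_update := by
  intro perts_text _ hpre hD
  match perts_text with
  | none => exact absurd rfl hpre
  | some s =>
    have hds : dropScan false false ((PySem.Str.split? s "\n").getD []) = true := by
      simpa [D_parse_perts_for_kb_update] using hD
    have hsepl : ("\n" : String).toList = ['\n'] := rfl
    have hsplit : PySem.Str.split? s "\n"
        = some ((PySem.Chars.splitOn s.toList ['\n']).map String.ofList) := by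
      simp only [PySem.Str.split?, PySem.Chars.split?, hsepl]
      rw [if_neg (by simp)]
      rfl
    have hlines : (PySem.Str.split? s "\n").getD []
        = (PySem.Chars.splitOn s.toList ['\n']).map String.ofList := by
      rw [hsplit]; rfl
    have hmap : ((PySem.Str.split? s "\n").getD []).map String.toList
        = PySem.Chars.splitOn s.toList ['\n'] := by
      rw [hlines, List.map_map]
      have hco : (String.toList ∘ String.ofList) = id := by
        funext l; simp [String.toList_ofList]
      rw [hco, List.map_id]
    have hjoin_s : PySem.Chars.join ['\n']
        (((PySem.Str.split? s "\n").getD []).map String.toList) = s.toList := by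
      rw [hmap]; exact splitOn_join s.toList
    have hlne : (PySem.Str.split? s "\n").getD [] ≠ [] := by
      rw [hlines]
      intro hnil
      exact splitOn_ne_nil s.toList (by simpa using hnil)
    have hWs : s.toList.length + 1 = Wt ((PySem.Str.split? s "\n").getD []) := by
      rw [← hjoin_s]
      exact join_len _ hlne
    have h2 : 2 ≤ hCount ((PySem.Str.split? s "\n").getD []) := by
      have := hCount_ge_two _ false hds
      simpa using this
    have hcw := countP_weight ((PySem.Str.split? s "\n").getD [])
    have hsne : s ≠ "" := by
      intro h
      subst h
      have h0 : ("" : String).toList.length = 0 := rfl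
      omega
    have hmain := main_invariant ((PySem.Str.split? s "\n").getD []) none [] [] []
    have hA : parse_perts_for_kb_update (some s)
        = ((if !(A_procSegs (buildSegs ((PySem.Str.split? s "\n").getD []) none []) [] []).1.isEmpty
              then PySem.Str.strip (PySem.Str.join "\n"
                (A_procSegs (buildSegs ((PySem.Str.split? s "\n").getD []) none []) [] []).1)
              else "Issue not specified"),
           (if !(A_procSegs (buildSegs ((PySem.Str.split? s "\n").getD []) none []) [] []).2.isEmpty
              then PySem.Str.strip (PySem.Str.join "\n"
                (A_procSegs (buildSegs ((PySem.Str.split? s "\n").getD []) none []) [] []).2)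
              else s)) := by
      simp only [parse_perts_for_kb_update]
      rw [if_neg (by simp [hsne])]
      exact congrArg (fun p : List String × List String =>
          ((if !p.1.isEmpty then PySem.Str.strip (PySem.Str.join "\n" p.1)
              else "Issue not specified"),
           (if !p.2.isEmpty then PySem.Str.strip (PySem.Str.join "\n" p.2) else s))) hmain
    have hB : parse_perts_for_kb_update_alt (some s)
        = ((if !(B_procSegs (buildSegs ((PySem.Str.split? s "\n").getD []) none []) [] []).1.isEmpty
              then PySem.Str.strip (PySem.Str.join "\n"
                (B_procSegs (buildSegs ((PySem.Str.split? s "\n").getD []) none []) [] []).1)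
              else "Issue not specified"),
           (if !(B_procSegs (buildSegs ((PySem.Str.split? s "\n").getD []) none []) [] []).2.isEmpty
              then PySem.Str.strip (PySem.Str.join "\n"
                (B_procSegs (buildSegs ((PySem.Str.split? s "\n").getD []) none []) [] []).2)
              else s)) := by
      simp only [parse_perts_for_kb_update_alt]
      rw [if_neg (by simp [hsne])]
      rfl
    intro heq
    rw [hA, hB] at heq
    have hsnd := congrArg Prod.snd heq
    dsimp only [] at hsnd
    rw [A_procSegs_snd, B_procSegs_snd, List.nil_append, List.nil_append] at hsnd
    exact tight_core s _ hjoin_s hds hsnd
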